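-- pv_equiv track=rewrite | github.com/dangoZhang/xiuxian.skill | vibecoding_skill/readme_sync.py | render_profile_block
-- ===== SOURCE A (Python) =====
-- README_PROFILE_MARKER_START = "<!-- AUTO_PROFILE_START -->"
--
-- README_PROFILE_MARKER_END = "<!-- AUTO_PROFILE_END -->"
--
-- def render_profile_block(panel: dict[str, object]) -> str:
--     tags = panel.get("tags")
--     if not isinstance(tags, list):
--         tags = []
--     paragraphs = panel.get("paragraphs")
--     if not isinstance(paragraphs, list):
--         paragraphs = []
--     lines: list[str] = [README_PROFILE_MARKER_START]
--     if tags: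
--         lines.append(" ".join(f"`{tag}`" for tag in tags))
--         lines.append("")
--     for paragraph in paragraphs:
--         lines.append(str(paragraph))
--         lines.append("")
--     if lines[-1] == "":
--         lines.pop()
--     lines.append(README_PROFILE_MARKER_END)
--     return "\n".join(lines)
-- ===== SOURCE B (Python) =====
-- README_PROFILE_MARKER_START = "<!-- AUTO_PROFILE_START -->"
--
-- README_PROFILE_MARKER_END = "<!-- AUTO_PROFILE_END -->"
--
-- def render_profile_block(panel: dict[str, object]) -> str:
--     tags = panel.get("tags")
--     if not isinstance(tags, list):
--         tags = []
--     paragraphs = panel.get("paragraphs")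
--     if not isinstance(paragraphs, list):
--         paragraphs = []
--     sections: list[str] = []
--     if tags:
--         sections.append(" ".join(f"`{t}`" for t in tags))
--     sections.extend(str(p) for p in paragraphs)
--     parts = [README_PROFILE_MARKER_START]
--     if sections:
--         parts.append("\n\n".join(sections))
--     parts.append(README_PROFILE_MARKER_END)
--     return "\n".join(parts)
-- ===== Notes on version B (the rewrite author's own statement) =====
-- stated objective: simpler
-- what changed: B collects the body sections (tag line, paragraphs) in a list and joins them with '\n\n', instead of A's appending a trailing blank line after each piece and popping the last blank before joining with '\n'.
import Mathlib
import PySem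

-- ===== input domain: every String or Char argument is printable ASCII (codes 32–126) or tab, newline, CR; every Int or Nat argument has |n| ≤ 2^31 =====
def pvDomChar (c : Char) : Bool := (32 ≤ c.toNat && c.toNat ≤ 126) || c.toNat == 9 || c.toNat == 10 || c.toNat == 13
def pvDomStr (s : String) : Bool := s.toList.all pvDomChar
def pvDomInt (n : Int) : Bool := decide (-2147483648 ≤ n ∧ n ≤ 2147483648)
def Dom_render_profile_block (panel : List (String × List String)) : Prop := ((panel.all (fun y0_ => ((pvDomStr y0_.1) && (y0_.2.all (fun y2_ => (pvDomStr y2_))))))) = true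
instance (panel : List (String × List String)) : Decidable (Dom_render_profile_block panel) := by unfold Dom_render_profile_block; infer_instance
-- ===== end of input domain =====

-- B replaces A's "append each piece plus a trailing blank line, then pop the last blank"
-- construction by joining the body sections with "\n\n" (objective: simpler; same cost).

def README_PROFILE_MARKER_START : String := "<!-- AUTO_PROFILE_START -->"
def README_PROFILE_MARKER_END : String := "<!-- AUTO_PROFILE_END -->"

-- ===== PORT A =====
-- panel.get(k) → first-match lookup on the association list (PySem.Dict);
-- the isinstance checks always hold on dict[str, list[str]] inputs, so `getD []`
-- is exactly the key-missing default; str(paragraph) is the identity on str.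
def render_profile_block (panel : List (String × List String)) : String :=
  let tags := ((PySem.Dict.mk panel).get? "tags").getD []
  let paragraphs := ((PySem.Dict.mk panel).get? "paragraphs").getD []
  let lines : List String := [README_PROFILE_MARKER_START]
  let lines := if tags.isEmpty then lines
    else lines ++ [PySem.Str.join " " (tags.map (fun tag => "`" ++ tag ++ "`")), ""]
  let lines := paragraphs.foldl (fun ls p => ls ++ [p, ""]) lines
  let lines := if lines.getLast? = some "" then lines.dropLast else lines
  PySem.Str.join "\n" (lines ++ [README_PROFILE_MARKER_END])

-- ===== PORT B =====
def render_profile_block_alt (panel : List (String × List String)) : String :=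
  let tags := ((PySem.Dict.mk panel).get? "tags").getD []
  let paragraphs := ((PySem.Dict.mk panel).get? "paragraphs").getD []
  let sections : List String :=
    (if tags.isEmpty then []
     else [PySem.Str.join " " (tags.map (fun t => "`" ++ t ++ "`"))]) ++ paragraphs
  let parts : List String :=
    [README_PROFILE_MARKER_START] ++
      (if sections.isEmpty then [] else [PySem.Str.join "\n\n" sections]) ++
      [README_PROFILE_MARKER_END]
  PySem.Str.join "\n" parts

-- ===== PRECONDITION & SPEC =====
def Spec_render_profile_block (panel : List (String × List String)) (out : String) : Prop := out = render_profile_block_alt panel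
instance (panel : List (String × List String)) (out : String) : Decidable (Spec_render_profile_block panel out) := by unfold Spec_render_profile_block; infer_instance

-- ===== CLAIM (what is proved, stated in full; the proofs are below) =====
def Claim_equal_render_profile_block : Prop := ∀ (panel : List (String × List String)), Dom_render_profile_block panel → Spec_render_profile_block panel (render_profile_block panel)

-- ===== LEMMAS AND PROOFS =====

-- A's paragraph loop appends [p, ""] per paragraph.
theorem pv_foldl_pair (ps : List String) (init : List String) :
    ps.foldl (fun ls p => ls ++ [p, ""]) init = init ++ ps.flatMap (fun p => [p, ""]) := by
  induction ps generalizing init with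
  | nil => simp
  | cons p t ih => simp [ih, List.append_assoc]

theorem pv_getLast_pair (sec : List String) (h : sec ≠ []) (a : String) :
    (a :: sec.flatMap (fun s => [s, ""])).getLast? = some "" := by
  induction sec generalizing a with
  | nil => exact absurd rfl h
  | cons s t ih =>
    cases t with
    | nil => rfl
    | cons q r => simpa [List.getLast?_cons_cons] using ih (by simp) q

theorem pv_dropLast_pair (sec : List String) :
    (sec.flatMap (fun s => [s, ""])).dropLast = sec.intersperse "" := by
  induction sec with
  | nil => rfl
  | cons s t ih =>
    cases t with
    | nil => rfl
    | cons q r =>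
      simp only [List.flatMap_cons, List.intersperse_cons₂]
      rw [show ([s, ""] : List String) ++ ([q, ""] ++ List.flatMap (fun s => [s, ""]) r)
            = s :: "" :: (List.flatMap (fun s => [s, ""]) (q :: r)) from by simp,
          List.dropLast_cons_of_ne_nil (by simp), List.dropLast_cons_of_ne_nil (by simp)]
      simpa using ih

theorem pv_join_cons_ne (nl a : List Char) (Z : List (List Char)) (h : Z ≠ []) :
    PySem.Chars.join nl (a :: Z) = a ++ nl ++ PySem.Chars.join nl Z := by
  cases Z with
  | nil => exact absurd rfl h
  | cons z zs => exact PySem.Chars.join_cons_cons nl a z zs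

theorem pv_join_cons_append (nl a b : List Char) (rest : List (List Char)) :
    PySem.Chars.join nl ((a ++ b) :: rest) = a ++ PySem.Chars.join nl (b :: rest) := by
  cases rest with
  | nil => simp [PySem.Chars.join_singleton]
  | cons r rs => simp [PySem.Chars.join_cons_cons]

theorem pv_map_intersperse (f : String → List Char) (x : String) (l : List String) :
    (l.intersperse x).map f = (l.map f).intersperse (f x) := by
  induction l with
  | nil => rfl
  | cons s t ih =>
    cases t with
    | nil => rfl
    | cons q r =>
      simp only [List.intersperse_cons₂, List.map_cons] at *
      rw [ih]

-- joining "section, blank, section, …" with "\n" = joining the sections with "\n\n".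
theorem pv_join_intersperse (nl p : List Char) (t : List (List Char))
    (rest : List (List Char)) :
    PySem.Chars.join nl ((p :: t).intersperse [] ++ rest)
      = PySem.Chars.join nl (PySem.Chars.join (nl ++ nl) (p :: t) :: rest) := by
  induction t generalizing p rest with
  | nil => simp [PySem.Chars.join_singleton]
  | cons q r ih =>
    rw [List.intersperse_cons₂, List.cons_append, List.cons_append,
        pv_join_cons_ne nl p _ (by simp),
        pv_join_cons_ne nl [] _ (by cases r <;> simp),
        ih q rest]
    conv_rhs => rw [PySem.Chars.join_cons_cons, pv_join_cons_append]
    simp [List.append_assoc]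

-- both sides for an abstract section list.
theorem pv_both (sec : List String) :
    PySem.Str.join "\n"
        ((if (README_PROFILE_MARKER_START :: sec.flatMap (fun s => [s, ""])).getLast? = some ""
          then (README_PROFILE_MARKER_START :: sec.flatMap (fun s => [s, ""])).dropLast
          else README_PROFILE_MARKER_START :: sec.flatMap (fun s => [s, ""]))
          ++ [README_PROFILE_MARKER_END])
      = PySem.Str.join "\n"
          ([README_PROFILE_MARKER_START]
            ++ (if sec.isEmpty then [] else [PySem.Str.join "\n\n" sec])
            ++ [README_PROFILE_MARKER_END]) := by
  cases sec with
  | nil => rw [if_neg (by decide)]; rfl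
  | cons p t =>
    rw [if_pos (pv_getLast_pair (p :: t) (by simp) _),
        List.dropLast_cons_of_ne_nil (by simp), pv_dropLast_pair]
    simp only [List.isEmpty_cons, if_neg (by simp : ¬((false : Bool) = true))]
    simp only [PySem.Str.join]
    congr 1
    simp only [List.cons_append, List.map_cons, List.map_append, List.map_nil,
      pv_map_intersperse, String.toList_ofList,
      show ("" : String).toList = ([] : List Char) from rfl]
    rw [pv_join_cons_ne _ _ _ (by cases t <;> simp),
        pv_join_intersperse,
        show ("\n\n" : String).toList = ("\n" : String).toList ++ ("\n" : String).toList from rfl]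
    simp [PySem.Chars.join_cons_cons, PySem.Chars.join_singleton, List.append_assoc]

-- ===== VERDICT (by name: the statement is the Claim_ definition above) =====
theorem render_profile_block_spec : Claim_equal_render_profile_block := by
  intro panel _
  unfold Spec_render_profile_block render_profile_block render_profile_block_alt
  set tg := ((PySem.Dict.mk panel).get? "tags").getD [] with htg
  set ps := ((PySem.Dict.mk panel).get? "paragraphs").getD [] with hps
  by_cases h : tg.isEmpty
  · simp only [h, if_pos, pv_foldl_pair, List.singleton_append, List.nil_append]
    exact pv_both ps
  · simp only [h, if_neg, Bool.false_eq_true, not_false_iff, pv_foldl_pair]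
    have : ([README_PROFILE_MARKER_START]
        ++ [PySem.Str.join " " (tg.map (fun tag => "`" ++ tag ++ "`")), ""])
        ++ ps.flatMap (fun p => [p, ""])
      = README_PROFILE_MARKER_START
        :: (PySem.Str.join " " (tg.map (fun tag => "`" ++ tag ++ "`")) :: ps).flatMap
            (fun s => [s, ""]) := by simp
    rw [this]
    simpa using pv_both (PySem.Str.join " " (tg.map (fun tag => "`" ++ tag ++ "`")) :: ps)
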